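-- pv_equiv track=rewrite | github.com/osoc-es/data-quality-madrid | EndPoint/app/RDF/validator.py | hasRepetitiveCols
-- ===== SOURCE A (Python) =====
-- def hasRepetitiveCols(row,rowCount):
--     '''Check if the row has repetitive columns
--
--       Args:
--           row: the row to be checked
--       Returns:
--           True if the row has repetitive columns
--     '''
--     repetitives = []
--     cols = set()
--     colNum = 0
--     for col in row:
--         if col in cols:
--             repetitives += [((rowCount,colNum),col)]
--         cols.add(col)
--         colNum += 1
--     return repetitives
-- ===== SOURCE B (Python) =====
-- def hasRepetitiveCols(row, rowCount):
--     '''Check if the row has repetitive columns (first-occurrence-index re-implementation).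
--
--     Build the first-occurrence index of every value in one pass; column i is a
--     repetition exactly when it is not the first occurrence of its value.
--     '''
--     first = {}
--     for i, c in enumerate(row):
--         first.setdefault(c, i)
--     return [((rowCount, i), c) for i, c in enumerate(row) if first[c] != i]
-- ===== Notes on version B (the rewrite author's own statement) =====
-- stated objective: alternative
-- what changed: Replaced the single stateful loop that maintains a growing seen-set, an explicit column counter and incremental emission by a two-phase decomposition: one pass builds the first-occurrence index of every value with setdefault, then a comprehension keeps exactly the columns that are not the first occurrence of their value.
import Mathlib
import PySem

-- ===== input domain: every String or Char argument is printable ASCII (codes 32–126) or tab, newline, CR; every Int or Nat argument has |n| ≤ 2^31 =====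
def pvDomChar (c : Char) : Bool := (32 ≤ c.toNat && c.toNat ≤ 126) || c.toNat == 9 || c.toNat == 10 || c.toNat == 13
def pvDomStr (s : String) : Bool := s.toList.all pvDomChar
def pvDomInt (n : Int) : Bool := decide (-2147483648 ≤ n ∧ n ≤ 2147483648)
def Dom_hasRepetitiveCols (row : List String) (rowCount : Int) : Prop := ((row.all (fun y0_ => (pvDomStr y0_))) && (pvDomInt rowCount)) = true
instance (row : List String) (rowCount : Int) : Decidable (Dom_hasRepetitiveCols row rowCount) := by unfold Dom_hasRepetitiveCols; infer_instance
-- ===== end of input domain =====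

-- B replaces A's incremental seen-set loop by a first-occurrence index built once,
-- then a comprehension keeping every column that is not the first occurrence of its value (alternative decomposition).

-- ===== PORT A =====
-- Literal port of A: fold over row carrying (repetitives, cols, colNum).
def hasRepetitiveCols (row : List String) (rowCount : Int) : List ((Int × Int) × String) :=
  (row.foldl
    (fun (st : List ((Int × Int) × String) × PySem.Set String × Int) col =>
      ((if PySem.Set.contains st.2.1 col then st.1 ++ [((rowCount, st.2.2), col)] else st.1),
       PySem.Set.add st.2.1 col,
       st.2.2 + 1))
    ([], PySem.Set.empty, 0)).1

-- ===== PORT B =====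
-- Literal port of B: build the first-occurrence dict with setdefault over enumerate(row),
-- then filter enumerate(row) by first[c] != i and build the tuples.
-- (first[c] is ported as getD with default -1: the key is always present, so the default is never read.)
def hasRepetitiveCols_alt (row : List String) (rowCount : Int) : List ((Int × Int) × String) :=
  let first : PySem.Dict String Int :=
    (PySem.List.enumerate row 0).foldl (fun d p => d.setdefault p.2 p.1) PySem.Dict.empty
  ((PySem.List.enumerate row 0).filter (fun p => decide (first.getD p.2 (-1) ≠ p.1))).map
    (fun p => ((rowCount, p.1), p.2))

-- ===== PRECONDITION & SPEC =====
def Spec_hasRepetitiveCols (row : List String) (rowCount : Int) (out : List ((Int × Int) × String)) : Prop := out = hasRepetitiveCols_alt row rowCount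
instance (row : List String) (rowCount : Int) (out : List ((Int × Int) × String)) : Decidable (Spec_hasRepetitiveCols row rowCount out) := by unfold Spec_hasRepetitiveCols; infer_instance

-- ===== CLAIM (what is proved, stated in full; the proofs are below) =====
def Claim_equal_hasRepetitiveCols : Prop := ∀ (row : List String) (rowCount : Int), Dom_hasRepetitiveCols row rowCount → Spec_hasRepetitiveCols row rowCount (hasRepetitiveCols row rowCount)

-- ===== LEMMAS AND PROOFS =====

-- canonical value: duplicates of l relative to the already-seen prefix pre, starting at column n
def pvCanon (rowCount : Int) : List String → List String → Nat → List ((Int × Int) × String)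
  | [], _, _ => []
  | x :: l, pre, n =>
      (if x ∈ pre then [((rowCount, (n : Int)), x)] else []) ++ pvCanon rowCount l (pre ++ [x]) (n + 1)

lemma pvA_loop (rowCount : Int) (l : List String) :
    ∀ (acc : List ((Int × Int) × String)) (s : PySem.Set String) (pre : List String) (n : Nat),
      (∀ x, x ∈ s ↔ x ∈ pre) →
      (l.foldl
        (fun (st : List ((Int × Int) × String) × PySem.Set String × Int) col =>
          ((if PySem.Set.contains st.2.1 col then st.1 ++ [((rowCount, st.2.2), col)] else st.1),
           PySem.Set.add st.2.1 col,
           st.2.2 + 1))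
        (acc, s, (n : Int))).1 = acc ++ pvCanon rowCount l pre n := by
  induction l with
  | nil => intro acc s pre n _; simp [pvCanon]
  | cons x l ih =>
      intro acc s pre n hs
      have hc : PySem.Set.contains s x = decide (x ∈ pre) := by
        simp [PySem.Set.contains, hs]
      have hmem : ∀ y, y ∈ PySem.Set.add s x ↔ y ∈ pre ++ [x] := by
        intro y
        rw [PySem.Set.mem_add]
        simp [hs]
      have hcast : (n : Int) + 1 = ((n + 1 : Nat) : Int) := by push_cast; ring
      simp only [List.foldl_cons, hc]
      rw [hcast]
      rw [ih _ _ (pre ++ [x]) (n + 1) hmem]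
      by_cases hx : x ∈ pre <;> simp [pvCanon, hx]

-- first occurrence of x in pre ++ x :: l when x does not occur in pre
lemma pvIdxOf_fresh {α : Type} [DecidableEq α] (pre l : List α) (x : α) (h : x ∉ pre) :
    (pre ++ x :: l).idxOf x = pre.length := by
  induction pre with
  | nil => simp
  | cons a pre ih =>
      have hax : a ≠ x := by intro he; exact h (by simp [he])
      rw [List.cons_append, List.idxOf_cons_ne _ hax]
      simp [ih (by intro hm; exact h (by simp [hm]))]

-- the setdefault loop builds the first-occurrence index
lemma pvBuild (l : List String) :
    ∀ (n : Nat) (d : PySem.Dict String Int) (c : String),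
      ((PySem.List.enumerate l (n : Int)).foldl (fun d p => d.setdefault p.2 p.1) d).get? c
        = if d.contains c = true then d.get? c
          else if c ∈ l then some ((n : Int) + ((l.idxOf c : Nat) : Int)) else none := by
  induction l with
  | nil =>
      intro n d c
      by_cases hc : d.contains c = true
      · simp [PySem.List.enumerate_nil, hc]
      · simp [PySem.List.enumerate_nil, hc,
          (PySem.Dict.get?_eq_none_iff_contains d c).mpr (by simpa using hc)]
  | cons x l ih =>
      intro n d c
      have hcast : (n : Int) + 1 = ((n + 1 : Nat) : Int) := by push_cast; ring
      rw [PySem.List.enumerate_cons, List.foldl_cons, hcast]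
      dsimp only
      by_cases hdx : d.contains x = true
      · rw [PySem.Dict.setdefault_of_contains d _ hdx, ih (n + 1) d c]
        split_ifs with h1 h2 h3 h4
        · rfl
        · have hcx : c ≠ x := by intro he; rw [he] at h1; exact h1 hdx
          rw [List.idxOf_cons_ne _ (Ne.symm hcx)]
          congr 1
          push_cast
          ring
        · exact absurd (by simp [h2] : c ∈ x :: l) h3
        · have hcx : c ≠ x := by intro he; rw [he] at h1; exact h1 hdx
          exact absurd (by rcases List.mem_cons.mp h4 with h | h; exact absurd h hcx; exact h) h2
        · rfl
      · rw [PySem.Dict.setdefault_of_not_contains d _ (by simpa using hdx),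
            ih (n + 1) (d.insert x (n : Int)) c]
        by_cases hcx : c = x
        · subst hcx
          simp [PySem.Dict.contains_insert_self, PySem.Dict.get?_insert_self, hdx]
        · have h1 : (d.insert x (n : Int)).contains c = d.contains c := by
            rw [PySem.Dict.contains_insert]
            simp [hcx]
          rw [h1, PySem.Dict.get?_insert_of_ne d _ hcx]
          split_ifs with hc h2 h3 h4
          · rfl
          · rw [List.idxOf_cons_ne _ (Ne.symm hcx)]
            congr 1
            push_cast
            ring
          · exact absurd (by simp [h2] : c ∈ x :: l) h3
          · exact absurd (by rcases List.mem_cons.mp h4 with h | h; exact absurd h hcx; exact h) h2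
          · rfl

lemma pvB_loop (rowCount : Int) (row : List String) (d : PySem.Dict String Int)
    (hd : ∀ c, c ∈ row → d.getD c (-1) = ((row.idxOf c : Nat) : Int)) :
    ∀ (l pre : List String) (n : Nat), row = pre ++ l → pre.length = n →
      ((PySem.List.enumerate l (n : Int)).filter (fun p => decide (d.getD p.2 (-1) ≠ p.1))).map
        (fun p => ((rowCount, p.1), p.2)) = pvCanon rowCount l pre n := by
  intro l
  induction l with
  | nil => intro pre n _ _; simp [PySem.List.enumerate_nil, pvCanon]
  | cons x l ih =>
      intro pre n hrow hn
      have hx_mem : x ∈ row := by rw [hrow]; simp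
      have hcond : decide (d.getD x (-1) ≠ (n : Int)) = decide (x ∈ pre) := by
        rw [hd x hx_mem, hrow]
        by_cases hx : x ∈ pre
        · have hlt : pre.idxOf x < pre.length := List.idxOf_lt_length_of_mem hx
          rw [List.idxOf_append_of_mem hx]
          simp only [hx, decide_true]
          rw [decide_eq_true_iff]
          intro he
          omega
        · rw [pvIdxOf_fresh pre l x hx, hn]
          simp [hx]
      have hcast : (n : Int) + 1 = ((n + 1 : Nat) : Int) := by push_cast; ring
      rw [PySem.List.enumerate_cons, List.filter_cons]
      simp only [hcond]
      have hrow' : row = (pre ++ [x]) ++ l := by rw [hrow]; simp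
      by_cases hx : x ∈ pre
      · simp only [hx, decide_true, if_true, List.map_cons, hcast,
          ih (pre ++ [x]) (n + 1) hrow' (by simp [hn])]
        simp [pvCanon, hx]
      · simp [pvCanon, hx]
        rw [hcast]
        have := ih (pre ++ [x]) (n + 1) hrow' (by simp [hn])
        simpa using this
-- ===== VERDICT (by name: the statement is the Claim_ definition above) =====
theorem hasRepetitiveCols_spec : Claim_equal_hasRepetitiveCols := by
  intro row rowCount _
  unfold Spec_hasRepetitiveCols hasRepetitiveCols hasRepetitiveCols_alt
  have hA := pvA_loop rowCount row [] PySem.Set.empty [] 0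
    (by intro x; simp [PySem.Set.empty])
  have hd : ∀ c, c ∈ row →
      ((PySem.List.enumerate row 0).foldl (fun d p => d.setdefault p.2 p.1)
        (PySem.Dict.empty : PySem.Dict String Int)).getD c (-1) = ((row.idxOf c : Nat) : Int) := by
    intro c hc
    have hb := pvBuild row 0 (PySem.Dict.empty : PySem.Dict String Int) c
    simp only [Nat.cast_zero] at hb
    rw [PySem.Dict.getD_eq_get?_getD, hb]
    simp [hc]
  have hB := pvB_loop rowCount row _ hd row [] 0 rfl rfl
  simp only [Nat.cast_zero] at hA hB
  rw [hA]
  simpa using hB.symm
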